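-- pv_equiv track=rewrite | github.com/BerBai/codedb | MarsCode/最大乘积区间问题.py | solution
-- ===== SOURCE A (Python) =====
-- def solution(n, data):
--     tmp = data[0]
--     l = r = 1
--     ans = {}
--     ans[tmp] = [l, r]
--     for i in range(1, len(data)):
--         if data[i-1] == 0:
--             # 避免重复值
--             if tmp not in ans:
--                 ans[tmp] = [l, r]
--             tmp = data[i]
--             l = r = i + 1
--
--         elif tmp < tmp*data[i]:
--             r = i + 1
--             tmp = tmp * data[i]
--             # 避免重复值
--             if tmp not in ans:
--                 ans[tmp] = [l, r]
--
--     # 加入末尾数 且 避免重复值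
--     if tmp not in ans:
--         ans[tmp] = [l, r]
--
--     key = max(ans)
--     return ans[key]
-- ===== SOURCE B (Python) =====
-- def solution(n, data):
--     # Stage 1: split positions — a new run starts at 0 and right after every zero.
--     length = len(data)
--     starts = [0] + [j + 1 for j in range(length - 1) if data[j] == 0]
--     ends = starts[1:] + [length]
--     # Stage 2: one candidate (value, interval) per run, by the greedy product extension.
--     cands = []
--     for s, e in zip(starts, ends):
--         val, r = data[s], s + 1
--         for i in range(s + 1, e):
--             if val < val * data[i]:
--                 val, r = val * data[i], i + 1
--         cands.append((val, [s + 1, r]))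
--     # Stage 3: first candidate with the maximal value.
--     return max(cands, key=lambda c: c[0])[1]
-- ===== Notes on version B (the rewrite author's own statement) =====
-- stated objective: alternative
-- what changed: Replaced A's single stateful scan with a dict of candidate products by a staged pipeline: first compute the run boundaries (positions after zeros), then map each run to one (value, interval) candidate by a local greedy fold, then take the first candidate of maximal value with max(key=...); the dict, its dedup guards and the cross-run mutable state disappear.
import Mathlib
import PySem

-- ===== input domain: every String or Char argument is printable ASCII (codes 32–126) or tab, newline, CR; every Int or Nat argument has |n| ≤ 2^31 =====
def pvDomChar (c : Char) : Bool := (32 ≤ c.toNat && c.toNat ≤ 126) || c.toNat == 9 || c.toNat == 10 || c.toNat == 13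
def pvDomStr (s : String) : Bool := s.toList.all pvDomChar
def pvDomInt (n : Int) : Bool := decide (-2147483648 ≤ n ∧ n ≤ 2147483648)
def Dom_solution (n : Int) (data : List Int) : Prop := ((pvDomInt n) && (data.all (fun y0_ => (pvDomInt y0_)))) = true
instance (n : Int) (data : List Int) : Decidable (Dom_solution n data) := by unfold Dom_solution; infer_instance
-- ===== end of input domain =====

-- B is a staged pipeline (run boundaries at zeros, one greedy candidate per run, then a
-- first-maximum reduction) replacing A's single stateful scan with a dict of products.

-- ===== PORT A =====
-- Python's 'if k not in ans: ans[k] = v'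
def insIf (ans : PySem.Dict Int (List Int)) (k : Int) (v : List Int) : PySem.Dict Int (List Int) :=
  if ans.contains k then ans else ans.insert k v

-- one iteration of A's loop; indices i come from range(1, len(data)), always in range,
-- so pyGetD's default is never used (exact).
def solutionStepA (data : List Int) (st : Int × Int × Int × PySem.Dict Int (List Int)) (i : Int) :
    Int × Int × Int × PySem.Dict Int (List Int) :=
  let (tmp, l, r, ans) := st
  if PySem.List.pyGetD data (i - 1) 0 = 0 then
    -- 避免重复值: if tmp not in ans: ans[tmp] = [l, r]
    (PySem.List.pyGetD data i 0, i + 1, i + 1, insIf ans tmp [l, r])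
  else if tmp < tmp * PySem.List.pyGetD data i 0 then
    (tmp * PySem.List.pyGetD data i 0, l, i + 1, insIf ans (tmp * PySem.List.pyGetD data i 0) [l, i + 1])
  else
    (tmp, l, r, ans)

def solution (n : Int) (data : List Int) : List Int :=
  let tmp := PySem.List.pyGetD data 0 0    -- data[0]; Pre_ excludes data = [] (IndexError)
  let ans : PySem.Dict Int (List Int) := (PySem.Dict.empty).insert tmp [1, 1]
  let st := (PySem.List.pyRange 1 data.length 1).foldl (solutionStepA data) (tmp, 1, 1, ans)
  let (tmp, l, r, ans) := st
  let ans := insIf ans tmp [l, r]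
  match PySem.List.max? ans.keys (fun y => y) with   -- key = max(ans)
  | some key => (ans.get? key).getD []               -- ans[key]; key ∈ ans so never the default
  | none => []

-- ===== PORT B =====
-- body of Source B's inner 'for i in range(s+1, e)' loop
def segStep (data : List Int) (st : Int × Int) (i : Int) : Int × Int :=
  if st.1 < st.1 * PySem.List.pyGetD data i 0 then (st.1 * PySem.List.pyGetD data i 0, i + 1)
  else st

-- one run's candidate (value, interval): Source B's inner loop from (data[s], s+1)
def segCand (data : List Int) (s e : Int) : Int × List Int :=
  let vr := (PySem.List.pyRange (s + 1) e 1).foldl (segStep data) (PySem.List.pyGetD data s 0, s + 1)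
  (vr.1, [s + 1, vr.2])

def solution_alt (n : Int) (data : List Int) : List Int :=
  let length : Int := (data.length : Int)
  let starts : List Int :=
    0 :: ((PySem.List.pyRange 0 (length - 1) 1).filter
            (fun j => PySem.List.pyGetD data j 0 == 0)).map (fun j => j + 1)
  let ends : List Int := starts.drop 1 ++ [length]
  let cands := (starts.zip ends).map (fun se => segCand data se.1 se.2)
  match PySem.List.max? cands (fun c => c.1) with   -- max(cands, key=lambda c: c[0])
  | some c => c.2
  | none => []                                      -- unreachable: cands is nonempty

-- ===== PRECONDITION & SPEC =====
-- data = [] is excluded: A raises IndexError on data[0].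
def Pre_solution (n : Int) (data : List Int) : Prop := data ≠ []
instance (n : Int) (data : List Int) : Decidable (Pre_solution n data) := by unfold Pre_solution; infer_instance
def pvWitness_solution : Int × List Int := (0, [2, 3])

def Spec_solution (n : Int) (data : List Int) (out : List Int) : Prop := out = solution_alt n data
instance (n : Int) (data : List Int) (out : List Int) : Decidable (Spec_solution n data out) := by unfold Spec_solution; infer_instance

-- ===== CLAIM (what is proved, stated in full; the proofs are below) =====
def Claim_equal_solution : Prop := ∀ (n : Int) (data : List Int), Dom_solution n data → Pre_solution n data → Spec_solution n data (solution n data)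

-- ===== LEMMAS AND PROOFS =====

/-- first maximal candidate by value (Python's `max(…, key=lambda c: c[0])`). -/
def bmax (cs : List (Int × List Int)) : Option (Int × List Int) :=
  PySem.List.max? cs (fun c => c.1)

/-- future run starts strictly after position `s`: `j+1` for every zero at `j ∈ [s, len-1)`. -/
def ZsFrom (data : List Int) (s : Int) : List Int :=
  ((PySem.List.pyRange s ((data.length : Int) - 1) 1).filter
      (fun j => PySem.List.pyGetD data j 0 == 0)).map (fun j => j + 1)

/-- B's candidate list for the runs starting at `s :: zs`. -/
def candsFrom (data : List Int) (s : Int) (zs : List Int) : List (Int × List Int) :=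
  ((s :: zs).zip (zs ++ [(data.length : Int)])).map (fun se => segCand data se.1 se.2)

/-- Invariant relating A's dict to the candidates of the completed runs `cs` and the
current partial candidate `(val, [l, r])`. -/
def AnsInv (ans : PySem.Dict Int (List Int)) (cs : List (Int × List Int))
    (val l r : Int) : Prop :=
  ∃ M I, bmax (cs ++ [(val, [l, r])]) = some (M, I) ∧
    ans.keys.Nodup ∧ (∀ k ∈ ans.keys, k ≤ M) ∧
    (M ∈ ans.keys → ans.get? M = some I) ∧
    ((∃ c ∈ cs, c.1 = M) → M ∈ ans.keys)

theorem insIf_eq_of_mem (ans : PySem.Dict Int (List Int)) (k : Int) (v : List Int)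
    (h : k ∈ ans.keys) : insIf ans k v = ans := by
  simp [insIf, (PySem.Dict.contains_iff_mem_keys ans k).mpr h]

theorem insIf_of_not_mem (ans : PySem.Dict Int (List Int)) (k : Int) (v : List Int)
    (h : k ∉ ans.keys) : insIf ans k v = ans.insert k v := by
  have hc : ans.contains k = false := by
    cases hx : ans.contains k
    · rfl
    · exact absurd ((PySem.Dict.contains_iff_mem_keys ans k).mp hx) h
  simp [insIf, hc]

theorem insIf_nodup (ans : PySem.Dict Int (List Int)) (k : Int) (v : List Int)
    (h : ans.keys.Nodup) : (insIf ans k v).keys.Nodup := by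
  by_cases hm : k ∈ ans.keys
  · rw [insIf_eq_of_mem ans k v hm]; exact h
  · rw [insIf_of_not_mem ans k v hm]; exact PySem.Dict.nodup_keys_insert ans k v h

theorem mem_insIf_iff (ans : PySem.Dict Int (List Int)) (k x : Int) (v : List Int) :
    x ∈ (insIf ans k v).keys ↔ x ∈ ans.keys ∨ x = k := by
  by_cases hm : k ∈ ans.keys
  · rw [insIf_eq_of_mem ans k v hm]
    constructor
    · exact Or.inl
    · rintro (h | h)
      · exact h
      · exact h ▸ hm
  · rw [insIf_of_not_mem ans k v hm, PySem.Dict.mem_keys_insert]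
    tauto

theorem insIf_get?_ne (ans : PySem.Dict Int (List Int)) (k x : Int) (v : List Int)
    (h : x ≠ k) : (insIf ans k v).get? x = ans.get? x := by
  by_cases hm : k ∈ ans.keys
  · rw [insIf_eq_of_mem ans k v hm]
  · rw [insIf_of_not_mem ans k v hm]; exact PySem.Dict.get?_insert_of_ne ans v h

theorem insIf_get?_self_of_not_mem (ans : PySem.Dict Int (List Int)) (k : Int) (v : List Int)
    (h : k ∉ ans.keys) : (insIf ans k v).get? k = some v := by
  rw [insIf_of_not_mem ans k v h]; exact PySem.Dict.get?_insert_self ans k v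

theorem bmax_snoc_none (xs : List (Int × List Int)) (v : Int) (iv : List Int)
    (h : bmax xs = none) : bmax (xs ++ [(v, iv)]) = some (v, iv) := by
  unfold bmax PySem.List.max? at h ⊢
  rw [List.foldl_append, h]
  rfl

theorem bmax_snoc_some (xs : List (Int × List Int)) (v : Int) (iv : List Int)
    (mv : Int) (miv : List Int) (h : bmax xs = some (mv, miv)) :
    bmax (xs ++ [(v, iv)]) = if mv < v then some (v, iv) else some (mv, miv) := by
  unfold bmax PySem.List.max? at h ⊢
  rw [List.foldl_append, h]
  rfl

theorem max?_of_inv (ans : PySem.Dict Int (List Int)) (M : Int)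
    (hmem : M ∈ ans.keys) (hmax : ∀ k ∈ ans.keys, k ≤ M) :
    PySem.List.max? ans.keys (fun y => y) = some M := by
  cases hm : PySem.List.max? ans.keys (fun y => y) with
  | none =>
    rw [PySem.List.max?_eq_none_iff] at hm
    rw [hm] at hmem; cases hmem
  | some m =>
    have hmm : m ∈ ans.keys := PySem.List.max?_mem hm
    have h1 : M ≤ m := PySem.List.max?_isMax hm M hmem
    have h2 : m ≤ M := hmax m hmm
    rw [le_antisymm h2 h1]

/-- closing the current run: the `if tmp not in ans: ans[tmp] = [l, r]` store. -/
theorem close_seg (ans : PySem.Dict Int (List Int)) (cs : List (Int × List Int))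
    (val l r : Int) (h : AnsInv ans cs val l r) :
    ∃ M I, bmax (cs ++ [(val, [l, r])]) = some (M, I) ∧
      (insIf ans val [l, r]).keys.Nodup ∧ (∀ k ∈ (insIf ans val [l, r]).keys, k ≤ M) ∧
      M ∈ (insIf ans val [l, r]).keys ∧ (insIf ans val [l, r]).get? M = some I := by
  obtain ⟨M, I, hb, hnd, hle, hget, hcs⟩ := h
  have hvle : val ≤ M := by
    have := PySem.List.max?_isMax hb (val, [l, r]) (by simp)
    simpa using this
  refine ⟨M, I, hb, insIf_nodup ans val [l, r] hnd, ?_, ?_, ?_⟩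
  · intro k hk
    rcases (mem_insIf_iff ans val k [l, r]).mp hk with h1 | h1
    · exact hle k h1
    · exact h1 ▸ hvle
  · by_cases hvm : val = M
    · exact (mem_insIf_iff ans val M [l, r]).mpr (Or.inr hvm.symm)
    · have hm := PySem.List.max?_mem hb
      rcases List.mem_append.mp hm with h1 | h1
      · exact (mem_insIf_iff ans val M [l, r]).mpr (Or.inl (hcs ⟨(M, I), h1, rfl⟩))
      · simp at h1
        exact absurd h1.1.symm hvm
  · by_cases hvm : val = M
    · by_cases hmem : M ∈ ans.keys
      · rw [insIf_eq_of_mem ans val [l, r] (by rw [hvm]; exact hmem)]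
        exact hget hmem
      · have hm := PySem.List.max?_mem hb
        rcases List.mem_append.mp hm with h1 | h1
        · exact absurd (hcs ⟨(M, I), h1, rfl⟩) hmem
        · simp at h1
          obtain ⟨h2, h3⟩ := h1
          rw [h3, ← hvm]
          exact insIf_get?_self_of_not_mem ans val [l, r] (by rw [hvm]; exact hmem)
    · have hMmem : M ∈ ans.keys := by
        have hm := PySem.List.max?_mem hb
        rcases List.mem_append.mp hm with h1 | h1
        · exact hcs ⟨(M, I), h1, rfl⟩
        · simp at h1
          exact absurd h1.1.symm hvm
      rw [insIf_get?_ne ans val M [l, r] (fun hh => hvm hh.symm)]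
      exact hget hMmem

/-- an in-run extension: the partial value strictly grows and is stored. -/
theorem bump (ans : PySem.Dict Int (List Int)) (cs : List (Int × List Int))
    (val l r val₂ r₂ : Int) (hlt : val < val₂) (h : AnsInv ans cs val l r) :
    AnsInv (insIf ans val₂ [l, r₂]) cs val₂ l r₂ := by
  obtain ⟨M, I, hb, hnd, hle, hget, hcs⟩ := h
  cases hmc : bmax cs with
  | none =>
    rw [bmax_snoc_none cs val [l, r] hmc, Option.some_inj, Prod.mk.injEq] at hb
    obtain ⟨hM, hI⟩ := hb
    have hcsnil : cs = [] := (PySem.List.max?_eq_none_iff cs _).mp hmc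
    refine ⟨val₂, [l, r₂], bmax_snoc_none cs val₂ [l, r₂] hmc,
      insIf_nodup ans val₂ [l, r₂] hnd, ?_, ?_, ?_⟩
    · intro k hk
      rcases (mem_insIf_iff ans val₂ k [l, r₂]).mp hk with h1 | h1
      · have := hle k h1; omega
      · omega
    · intro _
      have hnot : val₂ ∉ ans.keys := fun hm => by have := hle _ hm; omega
      exact insIf_get?_self_of_not_mem ans val₂ [l, r₂] hnot
    · rintro ⟨c, hc, -⟩
      rw [hcsnil] at hc; cases hc
  | some c =>
    obtain ⟨cv, ci⟩ := c
    rw [bmax_snoc_some cs val [l, r] cv ci hmc] at hb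
    have hcMax : ∀ y ∈ cs, y.1 ≤ cv := PySem.List.max?_isMax hmc
    have hcMem : ((cv, ci) : Int × List Int) ∈ cs := PySem.List.max?_mem hmc
    by_cases h1 : cv < val
    · rw [if_pos h1, Option.some_inj, Prod.mk.injEq] at hb
      obtain ⟨hM, hI⟩ := hb
      refine ⟨val₂, [l, r₂], ?_, insIf_nodup ans val₂ [l, r₂] hnd, ?_, ?_, ?_⟩
      · rw [bmax_snoc_some cs val₂ [l, r₂] cv ci hmc, if_pos (by omega : cv < val₂)]
      · intro k hk
        rcases (mem_insIf_iff ans val₂ k [l, r₂]).mp hk with hx | hx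
        · have := hle k hx; omega
        · omega
      · intro _
        have hnot : val₂ ∉ ans.keys := fun hm => by have := hle _ hm; omega
        exact insIf_get?_self_of_not_mem ans val₂ [l, r₂] hnot
      · rintro ⟨c', hc', he⟩
        have := hcMax c' hc'
        omega
    · rw [if_neg h1, Option.some_inj, Prod.mk.injEq] at hb
      obtain ⟨hM, hI⟩ := hb
      by_cases h2 : M < val₂
      · refine ⟨val₂, [l, r₂], ?_, insIf_nodup ans val₂ [l, r₂] hnd, ?_, ?_, ?_⟩
        · rw [bmax_snoc_some cs val₂ [l, r₂] cv ci hmc, if_pos (by omega : cv < val₂)]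
        · intro k hk
          rcases (mem_insIf_iff ans val₂ k [l, r₂]).mp hk with hx | hx
          · have := hle k hx; omega
          · omega
        · intro _
          have hnot : val₂ ∉ ans.keys := fun hm => by have := hle _ hm; omega
          exact insIf_get?_self_of_not_mem ans val₂ [l, r₂] hnot
        · rintro ⟨c', hc', he⟩
          have := hcMax c' hc'
          omega
      · refine ⟨M, I, ?_, insIf_nodup ans val₂ [l, r₂] hnd, ?_, ?_, ?_⟩
        · rw [bmax_snoc_some cs val₂ [l, r₂] cv ci hmc,
              if_neg (by omega : ¬ cv < val₂), hM, hI]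
        · intro k hk
          rcases (mem_insIf_iff ans val₂ k [l, r₂]).mp hk with hx | hx
          · exact hle k hx
          · omega
        · by_cases hv2 : val₂ = M
          · intro _
            have hMm : M ∈ ans.keys := hcs ⟨(cv, ci), hcMem, hM⟩
            rw [insIf_eq_of_mem ans val₂ [l, r₂] (hv2 ▸ hMm)]
            exact hget hMm
          · intro hk
            rcases (mem_insIf_iff ans val₂ M [l, r₂]).mp hk with hx | hx
            · rw [insIf_get?_ne ans val₂ M [l, r₂] (fun hh => hv2 hh.symm)]
              exact hget hx
            · exact absurd hx.symm hv2
        · intro hex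
          exact (mem_insIf_iff ans val₂ M [l, r₂]).mpr (Or.inl (hcs hex))

theorem reset (ans : PySem.Dict Int (List Int)) (cs : List (Int × List Int))
    (val l r nv nl nr : Int) (h : AnsInv ans cs val l r) :
    AnsInv (insIf ans val [l, r]) (cs ++ [(val, [l, r])]) nv nl nr := by
  obtain ⟨M, I, hb, hnd', hle', hMmem, hget'⟩ := close_seg ans cs val l r h
  by_cases h2 : M < nv
  · refine ⟨nv, [nl, nr], ?_, hnd', ?_, ?_, ?_⟩
    · rw [bmax_snoc_some (cs ++ [(val, [l, r])]) nv [nl, nr] M I hb, if_pos h2]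
    · intro k hk
      have := hle' k hk; omega
    · intro hk
      have := hle' nv hk; omega
    · rintro ⟨c, hc, he⟩
      have hx : c.1 ≤ M := PySem.List.max?_isMax hb c hc
      omega
  · refine ⟨M, I, ?_, hnd', hle', fun _ => hget', fun _ => hMmem⟩
    rw [bmax_snoc_some (cs ++ [(val, [l, r])]) nv [nl, nr] M I hb, if_neg h2]

/-- closing a run at a zero boundary (or conceptually at any restart point). -/
theorem interior_fold (data : List Int) : ∀ (is : List Int),
    (∀ i ∈ is, ¬ PySem.List.pyGetD data (i - 1) 0 = 0) →
    ∀ val l r ans cs, AnsInv ans cs val l r →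
      ∃ val' r' ans',
        is.foldl (solutionStepA data) (val, l, r, ans) = (val', l, r', ans') ∧
        is.foldl (segStep data) (val, r) = (val', r') ∧
        AnsInv ans' cs val' l r' := by
  intro is
  induction is with
  | nil =>
    intro _ val l r ans cs h
    exact ⟨val, r, ans, rfl, rfl, h⟩
  | cons i is ih =>
    intro hnz val l r ans cs h
    have hi : ¬ PySem.List.pyGetD data (i - 1) 0 = 0 := hnz i List.mem_cons_self
    have hrest : ∀ j ∈ is, ¬ PySem.List.pyGetD data (j - 1) 0 = 0 :=
      fun j hj => hnz j (List.mem_cons_of_mem i hj)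
    by_cases h2 : val < val * PySem.List.pyGetD data i 0
    · have hstepA : solutionStepA data (val, l, r, ans) i =
          (val * PySem.List.pyGetD data i 0, l, i + 1,
           insIf ans (val * PySem.List.pyGetD data i 0) [l, i + 1]) := by
        simp only [solutionStepA]
        rw [if_neg hi, if_pos h2]
      have hstepB : segStep data (val, r) i = (val * PySem.List.pyGetD data i 0, i + 1) := by
        simp only [segStep]
        rw [if_pos h2]
      simp only [List.foldl_cons]
      rw [hstepA, hstepB]
      exact ih hrest (val * PySem.List.pyGetD data i 0) l (i + 1)
        (insIf ans (val * PySem.List.pyGetD data i 0) [l, i + 1]) cs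
        (bump ans cs val l r (val * PySem.List.pyGetD data i 0) (i + 1) h2 h)
    · have hstepA : solutionStepA data (val, l, r, ans) i = (val, l, r, ans) := by
        simp only [solutionStepA]
        rw [if_neg hi, if_neg h2]
      have hstepB : segStep data (val, r) i = (val, r) := by
        simp only [segStep]
        rw [if_neg h2]
      simp only [List.foldl_cons]
      rw [hstepA, hstepB]
      exact ih hrest val l r ans cs h

theorem ZsFrom_nil (data : List Int) (s : Int) (h : ZsFrom data s = []) :
    ∀ j, s ≤ j → j < (data.length : Int) - 1 → ¬ PySem.List.pyGetD data j 0 = 0 := by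
  intro j h1 h2 h3
  have hmem : j + 1 ∈ ZsFrom data s := by
    unfold ZsFrom
    apply List.mem_map.mpr
    exact ⟨j, List.mem_filter.mpr
      ⟨PySem.List.mem_pyRange_one.mpr ⟨h1, h2⟩, by simpa using h3⟩, rfl⟩
  rw [h] at hmem
  cases hmem

theorem ZsFrom_cons (data : List Int) (s z : Int) (zs : List Int)
    (h : ZsFrom data s = z :: zs) :
    s + 1 ≤ z ∧ z < (data.length : Int) ∧ PySem.List.pyGetD data (z - 1) 0 = 0 ∧
    (∀ j, s ≤ j → j < z - 1 → ¬ PySem.List.pyGetD data j 0 = 0) ∧ zs = ZsFrom data z := by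
  have hz : z ∈ ZsFrom data s := by rw [h]; exact List.mem_cons_self
  unfold ZsFrom at hz
  obtain ⟨j, hjf, hj1⟩ := List.mem_map.mp hz
  obtain ⟨hjr, hj0⟩ := List.mem_filter.mp hjf
  obtain ⟨hsj, hjlen⟩ := PySem.List.mem_pyRange_one.mp hjr
  have hjz : j = z - 1 := by omega
  have hz0 : PySem.List.pyGetD data (z - 1) 0 = 0 := by
    rw [← hjz]; simpa using hj0
  have hpw : (ZsFrom data s).Pairwise (· < ·) := by
    unfold ZsFrom
    exact List.pairwise_map.mpr
      (((PySem.List.pairwise_lt_pyRange_one s ((data.length : Int) - 1)).filter _).imp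
        (by omega))
  rw [h] at hpw
  have hhead : ∀ y ∈ zs, z < y := (List.pairwise_cons.mp hpw).1
  have hmin : ∀ j', s ≤ j' → j' < z - 1 → ¬ PySem.List.pyGetD data j' 0 = 0 := by
    intro j' ha hb hc
    have hmem : j' + 1 ∈ ZsFrom data s := by
      unfold ZsFrom
      apply List.mem_map.mpr
      exact ⟨j', List.mem_filter.mpr
        ⟨PySem.List.mem_pyRange_one.mpr ⟨ha, by omega⟩, by simpa using hc⟩, rfl⟩
    rw [h] at hmem
    rcases List.mem_cons.mp hmem with h1 | h1
    · omega
    · have := hhead _ h1; omega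
  refine ⟨by omega, by omega, hz0, hmin, ?_⟩
  have e1 : PySem.List.pyRange s ((data.length : Int) - 1) 1 =
      PySem.List.pyRange s (z - 1) 1 ++ PySem.List.pyRange (z - 1) ((data.length : Int) - 1) 1 :=
    PySem.List.pyRange_one_append s (z - 1) _ (by omega) (by omega)
  have e2 : PySem.List.pyRange (z - 1) ((data.length : Int) - 1) 1 =
      (z - 1) :: PySem.List.pyRange z ((data.length : Int) - 1) 1 := by
    have hzz : z - 1 + 1 = z := by omega
    rw [PySem.List.pyRange_one_cons (a := z - 1) (b := (data.length : Int) - 1) (by omega), hzz]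
  have e3 : (PySem.List.pyRange s (z - 1) 1).filter
      (fun j => PySem.List.pyGetD data j 0 == 0) = [] := by
    apply List.filter_eq_nil_iff.mpr
    intro a ha
    obtain ⟨h1, h2⟩ := PySem.List.mem_pyRange_one.mp ha
    simpa using hmin a h1 h2
  have : ZsFrom data s = z :: ZsFrom data z := by
    unfold ZsFrom
    rw [e1, List.filter_append, e3, List.nil_append, e2, List.filter_cons,
        if_pos (by simpa using hz0)]
    have hzz2 : z - 1 + 1 = z := by omega
    simp only [List.map_cons]
    rw [hzz2]
  rw [h] at this
  injection this with h1 h2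

theorem candsFrom_nil (data : List Int) (s : Int) :
    candsFrom data s [] = [segCand data s (data.length : Int)] := rfl

theorem candsFrom_cons (data : List Int) (s z : Int) (zs : List Int) :
    candsFrom data s (z :: zs) = segCand data s z :: candsFrom data z zs := rfl

theorem main_fold (data : List Int) :
    ∀ (zs : List Int) (s : Int) (ans : PySem.Dict Int (List Int)) (cs : List (Int × List Int)),
      zs = ZsFrom data s →
      AnsInv ans cs (PySem.List.pyGetD data s 0) (s + 1) (s + 1) →
      ∃ M I val l r ans',
        (PySem.List.pyRange (s + 1) (data.length : Int) 1).foldl (solutionStepA data)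
          (PySem.List.pyGetD data s 0, s + 1, s + 1, ans) = (val, l, r, ans') ∧
        bmax (cs ++ candsFrom data s zs) = some (M, I) ∧
        PySem.List.max? (insIf ans' val [l, r]).keys (fun y => y) = some M ∧
        (insIf ans' val [l, r]).get? M = some I := by
  intro zs
  induction zs with
  | nil =>
    intro s ans cs hz hinv
    have hnz : ∀ i ∈ PySem.List.pyRange (s + 1) (data.length : Int) 1,
        ¬ PySem.List.pyGetD data (i - 1) 0 = 0 := by
      intro i hi
      obtain ⟨h1, h2⟩ := PySem.List.mem_pyRange_one.mp hi
      exact ZsFrom_nil data s hz.symm (i - 1) (by omega) (by omega)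
    obtain ⟨val', r', ans', heq, hseg, hinv'⟩ :=
      interior_fold data _ hnz (PySem.List.pyGetD data s 0) (s + 1) (s + 1) ans cs hinv
    obtain ⟨M, I, hb, hnd, hle, hMmem, hget⟩ := close_seg ans' cs val' (s + 1) r' hinv'
    refine ⟨M, I, val', s + 1, r', ans', heq, ?_, max?_of_inv _ M hMmem hle, hget⟩
    rw [candsFrom_nil]
    have hc : segCand data s (data.length : Int) = (val', [s + 1, r']) := by
      unfold segCand
      rw [hseg]
    rw [hc]
    exact hb
  | cons z zs ih =>
    intro s ans cs hz hinv
    obtain ⟨hsz, hzlen, hz0, hmin, hzs⟩ := ZsFrom_cons data s z zs hz.symm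
    have hsplit : PySem.List.pyRange (s + 1) (data.length : Int) 1 =
        PySem.List.pyRange (s + 1) z 1 ++ z :: PySem.List.pyRange (z + 1) (data.length : Int) 1 := by
      rw [PySem.List.pyRange_one_append (s + 1) z _ hsz (le_of_lt hzlen)]
      rw [PySem.List.pyRange_one_cons hzlen]
    have hnzin : ∀ i ∈ PySem.List.pyRange (s + 1) z 1,
        ¬ PySem.List.pyGetD data (i - 1) 0 = 0 := by
      intro i hi
      obtain ⟨h1, h2⟩ := PySem.List.mem_pyRange_one.mp hi
      exact hmin (i - 1) (by omega) (by omega)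
    obtain ⟨val', r', ans₁, heq₁, hseg₁, hinv₁⟩ :=
      interior_fold data _ hnzin (PySem.List.pyGetD data s 0) (s + 1) (s + 1) ans cs hinv
    have hstep : solutionStepA data (val', s + 1, r', ans₁) z =
        (PySem.List.pyGetD data z 0, z + 1, z + 1, insIf ans₁ val' [s + 1, r']) := by
      simp only [solutionStepA]
      rw [if_pos hz0]
    have hinv₂ := reset ans₁ cs val' (s + 1) r'
      (PySem.List.pyGetD data z 0) (z + 1) (z + 1) hinv₁
    have hc : segCand data s z = (val', [s + 1, r']) := by
      unfold segCand
      rw [hseg₁]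
    rw [← hc] at hinv₂
    obtain ⟨M, I, val, l, r, ans', heq₂, hb, hmax, hget⟩ :=
      ih z (insIf ans₁ val' [s + 1, r']) (cs ++ [segCand data s z]) hzs hinv₂
    refine ⟨M, I, val, l, r, ans', ?_, ?_, hmax, hget⟩
    · rw [hsplit, List.foldl_append, heq₁, List.foldl_cons, hstep]
      exact heq₂
    · rw [candsFrom_cons]
      rw [show cs ++ (segCand data s z :: candsFrom data z zs)
            = (cs ++ [segCand data s z]) ++ candsFrom data z zs by simp]
      exact hb

-- ===== VERDICT (by name: the statement is the Claim_ definition above) =====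
theorem solution_spec : Claim_equal_solution := by
  intro n data _ hpre
  unfold Spec_solution
  have hlen : (1 : Int) ≤ (data.length : Int) := by
    have h0 : 0 < data.length := List.length_pos_of_ne_nil hpre
    exact_mod_cast h0
  have hnm : PySem.List.pyGetD data 0 0 ∉
      (PySem.Dict.empty : PySem.Dict Int (List Int)).keys := by
    rw [PySem.Dict.keys_empty]; simp
  have hkeys0 : ((PySem.Dict.empty : PySem.Dict Int (List Int)).insert
      (PySem.List.pyGetD data 0 0) [1, 1]).keys = [PySem.List.pyGetD data 0 0] := by
    have hc : (PySem.Dict.empty : PySem.Dict Int (List Int)).contains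
        (PySem.List.pyGetD data 0 0) = false := by
      cases hx : (PySem.Dict.empty : PySem.Dict Int (List Int)).contains
          (PySem.List.pyGetD data 0 0)
      · rfl
      · exact absurd ((PySem.Dict.contains_iff_mem_keys _ _).mp hx) hnm
    rw [PySem.Dict.keys_insert_of_not_contains _ _ hc, PySem.Dict.keys_empty]
    rfl
  have hinv0 : AnsInv ((PySem.Dict.empty : PySem.Dict Int (List Int)).insert
      (PySem.List.pyGetD data 0 0) [1, 1]) [] (PySem.List.pyGetD data 0 0) 1 1 := by
    refine ⟨PySem.List.pyGetD data 0 0, [1, 1], rfl, ?_, ?_, ?_, ?_⟩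
    · rw [hkeys0]; simp
    · intro k hk
      rw [hkeys0] at hk
      simp at hk
      omega
    · intro _
      exact PySem.Dict.get?_insert_self _ _ _
    · rintro ⟨c, hc, -⟩
      cases hc
  obtain ⟨M, I, val, l, r, ans', heq, hb, hmax, hget⟩ :=
    main_fold data (ZsFrom data 0) 0
      ((PySem.Dict.empty : PySem.Dict Int (List Int)).insert
        (PySem.List.pyGetD data 0 0) [1, 1]) [] rfl (by simpa using hinv0)
  simp only [zero_add] at heq
  have hA : solution n data = I := by
    show (match (PySem.List.pyRange 1 (data.length : Int) 1).foldl (solutionStepA data)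
            (PySem.List.pyGetD data 0 0, 1, 1,
             (PySem.Dict.empty).insert (PySem.List.pyGetD data 0 0) [1, 1]) with
          | (tmp, l, r, ans) =>
            match PySem.List.max? (insIf ans tmp [l, r]).keys (fun y => y) with
            | some key => ((insIf ans tmp [l, r]).get? key).getD []
            | none => []) = I
    rw [heq]
    show (match PySem.List.max? (insIf ans' val [l, r]).keys (fun y => y) with
          | some key => ((insIf ans' val [l, r]).get? key).getD []
          | none => ([] : List Int)) = I
    rw [hmax]
    show ((insIf ans' val [l, r]).get? M).getD [] = I
    rw [hget]
    rfl
  have hB : solution_alt n data = I := by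
    have hb' : bmax (candsFrom data 0 (ZsFrom data 0)) = some (M, I) := by
      rw [← List.nil_append (candsFrom data 0 (ZsFrom data 0))]
      exact hb
    show (match bmax (candsFrom data 0 (ZsFrom data 0)) with
          | some c => c.2
          | none => ([] : List Int)) = I
    rw [hb']
  rw [hA, hB]
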